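-- pv_equiv track=rewrite | github.com/xslower/python | quant/bak/mk_bak/kmn-svc-2.py | trimSvmY
-- ===== SOURCE A (Python) =====
-- def trimSvmY(orgSvmY, kmsY, svmX, target = [0]):
--     svmY = []
--     for i in range(0, len(kmsY)):
--         if kmsY[i] in target:
--             svmY.append(orgSvmY[i])
--     if len(svmX) != len(svmY):
--         return svmY
--     i = len(svmX)
--     while i > 0:
--         i -= 1
--         if len(svmX[i]) == 0:
--             del(svmX[i], svmY[i])
--     return svmY
-- ===== SOURCE B (Python) =====
-- def trimSvmY(orgSvmY, kmsY, svmX, target=[0]):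
--     # single forward pass; slice-assigns kept rows back into svmX (same observable mutation as A's backward deletion)
--     tset = set(target)
--     svmY = [y for k, y in zip(kmsY, orgSvmY) if k in tset]
--     if len(svmX) != len(svmY):
--         return svmY
--     keptX, keptY = [], []
--     for x, y in zip(svmX, svmY):
--         if len(x) != 0:
--             keptX.append(x)
--             keptY.append(y)
--     svmX[:] = keptX
--     return keptY
-- ===== Notes on version B (the rewrite author's own statement) =====
-- stated objective: faster
-- what changed: Replaces A's index-driven loops (range-indexed label filter with a linear 'in target' scan per element, plus a backward while loop doing del svmX[i], svmY[i]) by a hash set of target built once and a single forward pass over zipped lists that builds the kept rows and slice-assigns them back into svmX.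
-- outside the precondition, e.g. on trimSvmY([], [0], [], [0]): A raises IndexError, B returns []
import Mathlib
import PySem

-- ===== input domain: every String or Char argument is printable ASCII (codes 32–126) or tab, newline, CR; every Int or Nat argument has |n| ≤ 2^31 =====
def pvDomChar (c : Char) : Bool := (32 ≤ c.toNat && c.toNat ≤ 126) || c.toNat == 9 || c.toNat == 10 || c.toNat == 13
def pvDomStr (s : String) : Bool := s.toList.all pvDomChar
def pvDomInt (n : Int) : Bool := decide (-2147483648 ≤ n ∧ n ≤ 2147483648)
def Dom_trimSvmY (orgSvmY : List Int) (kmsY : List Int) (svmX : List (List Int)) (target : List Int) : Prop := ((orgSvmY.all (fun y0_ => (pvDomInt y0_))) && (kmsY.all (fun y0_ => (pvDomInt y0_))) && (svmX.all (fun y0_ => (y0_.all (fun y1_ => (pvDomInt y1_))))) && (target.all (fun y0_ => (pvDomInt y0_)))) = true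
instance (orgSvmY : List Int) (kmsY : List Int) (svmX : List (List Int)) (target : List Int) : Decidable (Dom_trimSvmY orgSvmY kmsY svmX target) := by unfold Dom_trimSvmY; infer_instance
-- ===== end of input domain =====

-- B replaces A's index loops (quadratic backward `del`) with one forward pass over zipped lists (objective: faster).
-- A mutates svmX in place; B performs the equivalent mutation by slice assignment; the equivalence proved here is about the RETURN value.

-- ===== PORT A =====
-- the backward `while i > 0: i -= 1; if len(svmX[i]) == 0: del(svmX[i], svmY[i])` loop
def trimSvmYDelLoop : Nat → List (List Int) → List Int → List Int
  | 0, _, svmY => svmY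
  | i + 1, svmX, svmY =>
      if (PySem.List.pyGetD svmX (i : Int) []).length = 0 then
        trimSvmYDelLoop i (svmX.eraseIdx i) (svmY.eraseIdx i)
      else
        trimSvmYDelLoop i svmX svmY

def trimSvmY (orgSvmY : List Int) (kmsY : List Int) (svmX : List (List Int)) (target : List Int) : List Int :=
  let svmY := (PySem.List.pyRange 0 (kmsY.length : Int)).foldl
    (fun acc i =>
      if target.contains (PySem.List.pyGetD kmsY i 0) then
        acc ++ [PySem.List.pyGetD orgSvmY i 0]
      else acc) []
  if svmX.length ≠ svmY.length then svmY
  else trimSvmYDelLoop svmX.length svmX svmY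

-- ===== PORT B =====
def trimSvmY_alt (orgSvmY : List Int) (kmsY : List Int) (svmX : List (List Int)) (target : List Int) : List Int :=
  let tset := PySem.Set.ofList target
  let svmY := ((kmsY.zip orgSvmY).filter (fun p => tset.contains p.1)).map Prod.snd
  if svmX.length ≠ svmY.length then svmY
  else
    let kept := (svmX.zip svmY).foldl
      (fun (acc : List (List Int) × List Int) p =>
        if p.1.length ≠ 0 then (acc.1 ++ [p.1], acc.2 ++ [p.2]) else acc)
      ([], [])
    kept.2

-- ===== PRECONDITION & SPEC =====
-- Pre_ excludes exactly the inputs on which A raises IndexError: a label kmsY[i], with i beyond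
-- the end of orgSvmY, that lies in target (A then evaluates orgSvmY[i]).
def Pre_trimSvmY (orgSvmY : List Int) (kmsY : List Int) (svmX : List (List Int)) (target : List Int) : Prop :=
  ∀ k ∈ kmsY.drop orgSvmY.length, k ∉ target
instance (orgSvmY : List Int) (kmsY : List Int) (svmX : List (List Int)) (target : List Int) : Decidable (Pre_trimSvmY orgSvmY kmsY svmX target) := by unfold Pre_trimSvmY; infer_instance

def pvWitness_trimSvmY : List Int × List Int × List (List Int) × List Int :=
  ([3, 4], [0, 1], [[], [5]], [0])

def Spec_trimSvmY (orgSvmY : List Int) (kmsY : List Int) (svmX : List (List Int)) (target : List Int) (out : List Int) : Prop := out = trimSvmY_alt orgSvmY kmsY svmX target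
instance (orgSvmY : List Int) (kmsY : List Int) (svmX : List (List Int)) (target : List Int) (out : List Int) : Decidable (Spec_trimSvmY orgSvmY kmsY svmX target out) := by unfold Spec_trimSvmY; infer_instance

-- ===== CLAIM (what is proved, stated in full; the proofs are below) =====
def Claim_equal_trimSvmY : Prop := ∀ (orgSvmY : List Int) (kmsY : List Int) (svmX : List (List Int)) (target : List Int), Dom_trimSvmY orgSvmY kmsY svmX target → Pre_trimSvmY orgSvmY kmsY svmX target → Spec_trimSvmY orgSvmY kmsY svmX target (trimSvmY orgSvmY kmsY svmX target)

-- ===== LEMMAS AND PROOFS =====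

-- A's label-filtering loop (index form) equals B's zip comprehension, given Pre_.
lemma filter_loop_eq (kms org tg : List Int)
    (h : ∀ k ∈ kms.drop org.length, k ∉ tg) :
    ((List.range kms.length).filter (fun i => tg.contains (kms.getD i 0))).map
        (fun i => org.getD i 0)
      = ((kms.zip org).filter (fun p => tg.contains p.1)).map Prod.snd := by
  induction kms generalizing org with
  | nil => simp
  | cons k ks ih =>
    cases org with
    | nil =>
      simp only [List.zip_nil_right, List.filter_nil, List.map_nil]
      rw [List.filter_eq_nil_iff.mpr, List.map_nil]
      intro i hi
      simp only [List.mem_range] at hi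
      have hmem : (k :: ks).getD i 0 ∈ (k :: ks) := by
        rw [List.getD_eq_getElem _ _ hi]; exact List.getElem_mem hi
      have := h _ (by simpa using hmem)
      simpa using this
    | cons y ys =>
      rw [List.length_cons, List.range_succ_eq_map]
      have hrest : ∀ k' ∈ ks.drop ys.length, k' ∉ tg := by
        intro k' hk'; exact h k' (by simpa using hk')
      have ih' := ih ys hrest
      by_cases hk : tg.contains k
      · simp only [List.filter_cons, List.getD_cons_zero, hk, if_true, List.map_cons,
          List.filter_map, List.map_map, List.zip_cons_cons]
        refine congrArg (y :: ·) ?_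
        simpa [List.filter_map, List.map_map, Function.comp_def] using ih'
      · simp only [List.filter_cons, List.getD_cons_zero, hk, Bool.false_eq_true, if_false,
          List.filter_map, List.map_map, List.zip_cons_cons]
        simpa [hk, List.filter_map, List.map_map, Function.comp_def] using ih'

-- A's backward deletion loop, characterised via the untouched suffix.
lemma delLoop_eq (i : Nat) : ∀ (X : List (List Int)) (Y : List Int), i ≤ X.length → i ≤ Y.length →
    trimSvmYDelLoop i X Y
      = (((X.take i).zip (Y.take i)).filter (fun p => p.1.length ≠ 0)).map Prod.snd ++ Y.drop i := by
  induction i with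
  | zero => intro X Y _ _; simp [trimSvmYDelLoop]
  | succ i ih =>
    intro X Y hX hY
    have hiX : i < X.length := by omega
    have hiY : i < Y.length := by omega
    have hget : PySem.List.pyGetD X (i : Int) [] = X[i] := by
      rw [PySem.List.pyGetD_natCast, List.getD_eq_getElem _ _ hiX]
    have htakeX : X.take (i + 1) = X.take i ++ [X[i]] := List.take_succ_eq_append_getElem hiX
    have htakeY : Y.take (i + 1) = Y.take i ++ [Y[i]] := List.take_succ_eq_append_getElem hiY
    have hlen : (X.take i).length = (Y.take i).length := by
      simp [List.length_take]; omega
    have hdropY : Y.drop i = Y[i] :: Y.drop (i + 1) := List.drop_eq_getElem_cons hiY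
    rw [trimSvmYDelLoop, hget]
    by_cases hemp : (X[i]).length = 0
    · rw [if_pos hemp]
      rw [ih (X.eraseIdx i) (Y.eraseIdx i)
            (by rw [List.length_eraseIdx_of_lt hiX]; omega)
            (by rw [List.length_eraseIdx_of_lt hiY]; omega)]
      rw [List.eraseIdx_eq_take_drop_succ X i, List.eraseIdx_eq_take_drop_succ Y i]
      rw [List.take_append_of_le_length (by simp [List.length_take]; omega),
          List.take_append_of_le_length (by simp [List.length_take]; omega),
          List.drop_append_of_le_length (by simp [List.length_take]; omega)]
      simp only [List.take_take, Nat.min_self]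
      rw [htakeX, htakeY, List.zip_append (by simpa using hlen)]
      simp [List.length_eq_zero_iff.mp hemp]
    · rw [if_neg hemp]
      rw [ih X Y (by omega) (by omega)]
      rw [htakeX, htakeY, List.zip_append (by simpa using hlen)]
      have hne : X[i] ≠ [] := by simpa [List.length_eq_zero_iff] using hemp
      rw [hdropY]
      simp [hne]

-- the second component of B's pair-building fold, as a plain append-if fold
lemma pairFold_snd (l : List (List Int × Int)) : ∀ (a : List (List Int)) (b : List Int),
    (l.foldl
      (fun (acc : List (List Int) × List Int) p =>
        if p.1.length ≠ 0 then (acc.1 ++ [p.1], acc.2 ++ [p.2]) else acc) (a, b)).2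
    = l.foldl (fun acc p => if p.1.length ≠ 0 then acc ++ [p.2] else acc) b := by
  induction l with
  | nil => intro a b; rfl
  | cons p l ih =>
    intro a b
    by_cases hp : p.1.length ≠ 0
    · rw [List.foldl_cons, List.foldl_cons, if_pos hp, if_pos hp, ih]
    · rw [List.foldl_cons, List.foldl_cons, if_neg hp, if_neg hp, ih]

-- A's svmY-building foldl, rewritten to the index filter/map form
lemma buildY_eq (orgSvmY kmsY target : List Int) :
    (PySem.List.pyRange 0 (kmsY.length : Int)).foldl
      (fun acc i =>
        if target.contains (PySem.List.pyGetD kmsY i 0) then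
          acc ++ [PySem.List.pyGetD orgSvmY i 0]
        else acc) []
    = ((List.range kmsY.length).filter (fun i => target.contains (kmsY.getD i 0))).map
        (fun i => orgSvmY.getD i 0) := by
  rw [PySem.List.pyRange_zero_natCast, List.foldl_map]
  rw [show (fun (acc : List Int) (k : Nat) =>
        if target.contains (PySem.List.pyGetD kmsY (k : Int) 0) then
          acc ++ [PySem.List.pyGetD orgSvmY (k : Int) 0]
        else acc)
      = (fun acc k =>
        if (fun k => target.contains (kmsY.getD k 0)) k = true then
          acc ++ [(fun k => orgSvmY.getD k 0) k]
        else acc) from by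
    funext acc k; simp [PySem.List.pyGetD_natCast]]
  rw [PySem.List.foldl_append_if]
  simp

-- ===== VERDICT (by name: the statement is the Claim_ definition above) =====
theorem trimSvmY_spec : Claim_equal_trimSvmY := by
  intro orgSvmY kmsY svmX target _ hpre
  unfold Spec_trimSvmY trimSvmY trimSvmY_alt
  have hY : (PySem.List.pyRange 0 (kmsY.length : Int)).foldl
      (fun acc i =>
        if target.contains (PySem.List.pyGetD kmsY i 0) then
          acc ++ [PySem.List.pyGetD orgSvmY i 0]
        else acc) []
      = ((kmsY.zip orgSvmY).filter (fun p => target.contains p.1)).map Prod.snd := by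
    rw [buildY_eq]; exact filter_loop_eq kmsY orgSvmY target hpre
  have hset : (fun (p : Int × Int) => (PySem.Set.ofList target).contains p.1)
      = (fun p => target.contains p.1) := by
    funext p; simp [PySem.Set.contains, PySem.Set.mem_ofList]
  simp only [hset, hY]
  set Y := ((kmsY.zip orgSvmY).filter (fun p => target.contains p.1)).map Prod.snd with hYdef
  by_cases hlen : svmX.length ≠ Y.length
  · simp [hlen]
  · rw [not_not] at hlen
    simp only [hlen, ne_eq, not_true_eq_false, if_false]
    rw [pairFold_snd]
    rw [delLoop_eq Y.length svmX Y (le_of_eq hlen.symm) le_rfl,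
        show svmX.take Y.length = svmX from by rw [← hlen, List.take_length],
        List.take_length, List.drop_length, List.append_nil]
    rw [show (fun (acc : List Int) (p : List Int × Int) => if p.1.length ≠ 0 then acc ++ [p.2] else acc)
          = (fun acc p => if (fun (p : List Int × Int) => decide (p.1.length ≠ 0)) p = true then acc ++ [Prod.snd p] else acc) from by
        funext acc p; simp]
    rw [PySem.List.foldl_append_if]
    simp
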